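-- pv_equiv track=rewrite | github.com/Bwendel26/AT_fundamentos_python_infnet | questao6.py | read_tup
-- ===== SOURCE A (Python) =====
-- def read_tup(tup):
--
--     odd_list = []
--     position_even = []
--     for i in range(len(tup)):
--         if tup[i] % 2 != 0:
--             odd_list.append(tup[i])
--
--         if i == 0 or i % 2 == 0:
--             position_even.append(tup[i])
--
--     tup_position_even = tuple(position_even)
--
--     return odd_list, tup_position_even
-- ===== SOURCE B (Python) =====
-- def read_tup(tup):
--     odd_list = [x for x in tup if x % 2 != 0]
--     tup_position_even = tuple(tup[::2])
--     return odd_list, tup_position_even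
-- ===== Notes on version B (the rewrite author's own statement) =====
-- stated objective: simpler
-- what changed: Replaces the single index loop with two independent passes: a filter comprehension for the odd values and a stride slice tup[::2] for the even-indexed elements, removing all index arithmetic.
import Mathlib
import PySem

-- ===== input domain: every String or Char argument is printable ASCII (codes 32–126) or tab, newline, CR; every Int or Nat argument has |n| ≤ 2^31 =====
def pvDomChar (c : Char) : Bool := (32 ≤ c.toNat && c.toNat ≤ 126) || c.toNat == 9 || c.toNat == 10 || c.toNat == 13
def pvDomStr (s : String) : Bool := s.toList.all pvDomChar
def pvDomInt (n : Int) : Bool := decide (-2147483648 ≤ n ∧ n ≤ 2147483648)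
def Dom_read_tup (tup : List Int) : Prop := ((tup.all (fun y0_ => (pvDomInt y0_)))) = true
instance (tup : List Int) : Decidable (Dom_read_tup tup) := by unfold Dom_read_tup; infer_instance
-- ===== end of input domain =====

-- B computes the two results by two independent passes (a filter and a stride slice tup[::2])
-- instead of A's single index loop: simpler, no index arithmetic. Proved equal on all inputs.


-- ===== PORT A =====
-- loop body of 'for i in range(len(tup)):' (state = (odd_list, position_even))
def read_tup_step (tup : List Int) (s : List Int × List Int) (i : Int) : List Int × List Int :=
  let x := PySem.List.pyGetD tup i 0   -- tup[i]; i is always in range here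
  let s1 := if PySem.Int.mod x 2 ≠ 0 then (s.1 ++ [x], s.2) else s
  if i = 0 ∨ PySem.Int.mod i 2 = 0 then (s1.1, s1.2 ++ [x]) else s1

def read_tup (tup : List Int) : List Int × List Int :=
  let st := (PySem.List.pyRange 0 (tup.length : Int) 1).foldl (read_tup_step tup) ([], [])
  (st.1, st.2)

-- ===== PORT B =====
def read_tup_alt (tup : List Int) : List Int × List Int :=
  let odd_list := tup.filter (fun x => PySem.Int.mod x 2 ≠ 0)
  let tup_position_even := (PySem.List.slice? tup none none 2).getD []   -- tup[::2]; step ≠ 0, never none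
  (odd_list, tup_position_even)

-- ===== PRECONDITION & SPEC =====
def Spec_read_tup (tup : List Int) (out : List Int × List Int) : Prop := out = read_tup_alt tup
instance (tup : List Int) (out : List Int × List Int) : Decidable (Spec_read_tup tup out) := by unfold Spec_read_tup; infer_instance

-- ===== CLAIM (what is proved, stated in full; the proofs are below) =====
def Claim_equal_read_tup : Prop := ∀ (tup : List Int), Dom_read_tup tup → Spec_read_tup tup (read_tup tup)

-- ===== LEMMAS AND PROOFS =====

-- the even-indexed elements, taken two at a time
def everyOther : List Int → List Int
  | [] => []
  | [x] => [x]
  | x :: _ :: r => x :: everyOther r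

theorem everyOther_append_singleton (ys : List Int) (y : Int) :
    everyOther (ys ++ [y]) =
      if ys.length % 2 = 0 then everyOther ys ++ [y] else everyOther ys := by
  induction ys using everyOther.induct with
  | case1 => simp [everyOther]
  | case2 x => simp [everyOther]
  | case3 x z r ih =>
    simp only [List.cons_append, everyOther, ih, List.length_cons]
    have h2 : (r.length + 1 + 1) % 2 = r.length % 2 := by omega
    rw [h2]
    split <;> simp

theorem filterMap_stride2 (xs : List Int) :
    List.filterMap (fun k : Nat => xs[(2 * (k : Int)).toNat]?) (List.range ((xs.length + 1) / 2))
      = everyOther xs := by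
  induction xs using everyOther.induct with
  | case1 => simp [everyOther]
  | case2 x => simp [everyOther, List.range_succ]
  | case3 x z r ih =>
    have hc : (r.length + 1 + 1 + 1) / 2 = (r.length + 1) / 2 + 1 := by omega
    simp only [List.length_cons, everyOther, hc, List.range_succ_eq_map,
      List.filterMap_cons, List.filterMap_map]
    have h0 : ((2 : Int) * ((0 : Nat) : Int)).toNat = 0 := by norm_num
    rw [h0]
    simp only [List.getElem?_cons_zero, Function.comp]
    have hk : ∀ k : Nat, ((2 : Int) * (((k + 1 : Nat) : Nat) : Int)).toNat = 2 * k + 2 := by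
      intro k; push_cast; omega
    have hg : ∀ k : Nat, (x :: z :: r)[((2 : Int) * (((k + 1 : Nat) : Nat) : Int)).toNat]?
        = r[(2 * (k : Int)).toNat]? := by
      intro k
      rw [hk k]
      have : ((2 : Int) * (k : Int)).toNat = 2 * k := by omega
      simp [this]
    simp only [hg, ih]

theorem slice2_eq_everyOther (xs : List Int) :
    PySem.List.slice? xs none none 2 = some (everyOther xs) := by
  simp only [PySem.List.slice?, PySem.List.sliceIndices]
  norm_num
  have hcount : (if 0 < xs.length then (((xs.length : Int) + 2 - 1) / 2).toNat else 0)
      = (xs.length + 1) / 2 := by split <;> omega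
  rw [hcount]
  exact filterMap_stride2 xs

theorem foldA_eq (tup : List Int) :
    (PySem.List.pyRange 0 (tup.length : Int) 1).foldl (read_tup_step tup) ([], [])
      = (tup.filter (fun x => PySem.Int.mod x 2 ≠ 0), everyOther tup) := by
  induction tup using List.reverseRecOn with
  | nil => simp [PySem.List.pyRange_one_eq_nil, everyOther]
  | append_singleton ys y ih =>
    have hm : ((ys ++ [y]).length : Int) = (ys.length : Int) + 1 := by simp
    rw [hm, PySem.List.pyRange_one_succ_right (by positivity), List.foldl_append]
    have hcongr : (PySem.List.pyRange 0 (ys.length : Int) 1).foldl (read_tup_step (ys ++ [y])) ([], [])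
        = (PySem.List.pyRange 0 (ys.length : Int) 1).foldl (read_tup_step ys) ([], []) := by
      apply PySem.List.foldl_congr_mem
      intro acc i hi
      rw [PySem.List.mem_pyRange_one] at hi
      have hget : PySem.List.pyGetD (ys ++ [y]) i 0 = PySem.List.pyGetD ys i 0 := by
        rw [PySem.List.pyGetD_eq_getElem _ _ hi.1 (by simp; omega),
            PySem.List.pyGetD_eq_getElem _ _ hi.1 (by exact_mod_cast hi.2)]
        exact List.getElem_append_left (by omega)
      simp [read_tup_step, hget]
    rw [hcongr, ih]
    have hgety : PySem.List.pyGetD (ys ++ [y]) (ys.length : Int) 0 = y := by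
      rw [PySem.List.pyGetD_eq_getElem _ _ (by positivity) (by simp)]
      simp
    simp only [List.foldl_cons, List.foldl_nil, read_tup_step, hgety, List.filter_append,
      everyOther_append_singleton]
    have hif : (ys = [] ∨ (2:Int) ∣ (ys.length : Int)) ↔ ys.length % 2 = 0 := by
      constructor
      · rintro (rfl | h)
        · rfl
        · omega
      · intro h; right; omega
    by_cases hodd : y % 2 = 1 <;> by_cases hpar : ys.length % 2 = 0 <;>
      simp [hodd, hpar, hif, List.filter]

theorem read_tup_spec : Claim_equal_read_tup := by
  intro tup _
  show read_tup tup = read_tup_alt tup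
  simp only [read_tup, read_tup_alt, foldA_eq, slice2_eq_everyOther, Option.getD_some]
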